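-- pv_equiv track=rewrite | github.com/rscheiwe/vel-harness | vel_harness/analysis/trace_analysis.py | _has_unrecovered_failure_burst
-- ===== SOURCE A (Python) =====
-- from typing import Any, Dict, Iterable, List, Literal, Sequence
--
-- def _has_unrecovered_failure_burst(tool_events: Sequence[Dict[str, Any]]) -> bool:
--     streak = 0
--     for event in tool_events:
--         et = event.get("event_type")
--         if et == "tool-failure":
--             streak += 1
--             if streak >= 3:
--                 return True
--         elif et == "tool-success":
--             streak = 0
--     return False
-- ===== SOURCE B (Python) =====
-- from typing import Any, Dict, Sequence
--
-- def _has_unrecovered_failure_burst(tool_events: Sequence[Dict[str, Any]]) -> bool: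
--     symbols = {"tool-failure": "F", "tool-success": "S"}
--     s = "".join(symbols.get(event.get("event_type"), "") for event in tool_events)
--     return "FFF" in s
-- ===== Notes on version B (the rewrite author's own statement) =====
-- stated objective: idiomatic
-- what changed: Replaces the explicit streak counter with early return by mapping events to a compact 'F'/'S' string (other events emit nothing) and testing for the substring 'FFF'.
import Mathlib
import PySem

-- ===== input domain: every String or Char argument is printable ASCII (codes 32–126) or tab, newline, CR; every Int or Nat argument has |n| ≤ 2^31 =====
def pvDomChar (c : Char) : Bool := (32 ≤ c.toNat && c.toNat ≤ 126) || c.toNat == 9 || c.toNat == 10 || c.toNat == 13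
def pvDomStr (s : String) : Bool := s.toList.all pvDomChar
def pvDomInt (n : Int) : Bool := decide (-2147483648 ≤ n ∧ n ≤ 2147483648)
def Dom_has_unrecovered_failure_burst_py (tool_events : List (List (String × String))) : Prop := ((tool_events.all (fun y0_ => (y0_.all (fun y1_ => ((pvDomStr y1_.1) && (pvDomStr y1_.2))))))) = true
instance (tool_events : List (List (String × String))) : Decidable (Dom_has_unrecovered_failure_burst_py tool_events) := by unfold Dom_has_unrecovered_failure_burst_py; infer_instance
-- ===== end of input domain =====

-- B replaces A's streak counter with an idiomatic map-to-'F'/'S'-string + substring search for "FFF"; same O(n) cost.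

-- ===== PORT A =====
-- the for-loop of A with its `streak` accumulator and early `return True`
def pvLoopA : List (List (String × String)) → Nat → Bool
  | [], _ => false
  | e :: rest, streak =>
    let et := (PySem.Dict.ofList e).get? "event_type"
    if et = some "tool-failure" then
      if streak + 1 ≥ 3 then true else pvLoopA rest (streak + 1)
    else if et = some "tool-success" then pvLoopA rest 0
    else pvLoopA rest streak

def has_unrecovered_failure_burst_py (tool_events : List (List (String × String))) : Bool :=
  pvLoopA tool_events 0

-- ===== PORT B =====
-- symbols.get(event.get("event_type"), "") : the contribution of one event to the joined string
def pvSym (e : List (String × String)) : List Char :=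
  match (PySem.Dict.ofList e).get? "event_type" with
  | some "tool-failure" => ['F']
  | some "tool-success" => ['S']
  | _ => []

-- Python's `"FFF" in s` substring test, as a left-to-right scan
def pvHasFFF : List Char → Bool
  | 'F' :: 'F' :: 'F' :: _ => true
  | _ :: t => pvHasFFF t
  | [] => false

def has_unrecovered_failure_burst_py_alt (tool_events : List (List (String × String))) : Bool :=
  pvHasFFF (tool_events.flatMap pvSym)

-- ===== PRECONDITION & SPEC =====
def Spec_has_unrecovered_failure_burst_py (tool_events : List (List (String × String))) (out : Bool) : Prop := out = has_unrecovered_failure_burst_py_alt tool_events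
instance (tool_events : List (List (String × String))) (out : Bool) : Decidable (Spec_has_unrecovered_failure_burst_py tool_events out) := by unfold Spec_has_unrecovered_failure_burst_py; infer_instance

-- ===== CLAIM (what is proved, stated in full; the proofs are below) =====
def Claim_equal_has_unrecovered_failure_burst_py : Prop := ∀ (tool_events : List (List (String × String))), Dom_has_unrecovered_failure_burst_py tool_events → Spec_has_unrecovered_failure_burst_py tool_events (has_unrecovered_failure_burst_py tool_events)

-- ===== LEMMAS AND PROOFS =====
-- invariant: a pending streak of s (< 3) failures behaves like s leading 'F' characters
theorem pvLoop_eq (rest : List (List (String × String))) :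
    ∀ s : Nat, s ≤ 2 →
      pvLoopA rest s = pvHasFFF (List.replicate s 'F' ++ rest.flatMap pvSym) := by
  induction rest with
  | nil =>
    intro s hs
    interval_cases s <;> simp [pvLoopA, pvHasFFF]
  | cons e rest ih =>
    intro s hs
    rw [pvLoopA]
    simp only [List.flatMap_cons]
    rcases het : (PySem.Dict.ofList e).get? "event_type" with _ | v
    · have hsym : pvSym e = [] := by simp [pvSym, het]
      simp [hsym, ih s hs]
    · by_cases hf : v = "tool-failure"
      · subst hf
        have hsym : pvSym e = ['F'] := by simp [pvSym, het]
        simp only [hsym]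
        interval_cases s
        · simpa [pvLoopA] using ih 1 (by omega)
        · simpa [pvHasFFF] using ih 2 (by omega)
        · simp [pvHasFFF]
      · by_cases hsuc : v = "tool-success"
        · subst hsuc
          have hsym : pvSym e = ['S'] := by simp [pvSym, het]
          simp only [hsym]
          interval_cases s <;> simpa [pvHasFFF] using ih 0 (by omega)
        · have hsym : pvSym e = [] := by simp [pvSym, het, hf, hsuc]
          simp [hf, hsuc, hsym, ih s hs]

-- ===== VERDICT (by name: the statement is the Claim_ definition above) =====
theorem has_unrecovered_failure_burst_py_spec : Claim_equal_has_unrecovered_failure_burst_py := by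
  intro evs _
  unfold Spec_has_unrecovered_failure_burst_py has_unrecovered_failure_burst_py has_unrecovered_failure_burst_py_alt
  simpa using pvLoop_eq evs 0 (by omega)
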